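-- pv_equiv track=rewrite | github.com/MatthewRHermes/mrh | my_sympy/spin/lassi_tdms_spins/operators.py | normal_order_factor
-- ===== SOURCE A (Python) =====
-- def normal_order_factor (crops):
--     nperms = 0
--     nskip = 0
--     for spin in crops:
--         if spin==0:
--             nperms += nskip
--         else: nskip += 1
--     factor = (1,-1)[nperms % 2]
--     return factor
-- ===== SOURCE B (Python) =====
-- def normal_order_factor(crops):
--     total = 0
--     for i, spin in enumerate(crops):
--         if spin == 0:
--             total += sum(1 for x in crops[:i] if x != 0)
--     return (1, -1)[total % 2]
-- ===== Notes on version B (the rewrite author's own statement) =====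
-- stated objective: alternative
-- what changed: Replaces the single pass with a running nonzero counter by an explicit inversion count: a double scan that, for each zero entry, recounts the nonzero entries in the prefix before it.
import Mathlib
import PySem

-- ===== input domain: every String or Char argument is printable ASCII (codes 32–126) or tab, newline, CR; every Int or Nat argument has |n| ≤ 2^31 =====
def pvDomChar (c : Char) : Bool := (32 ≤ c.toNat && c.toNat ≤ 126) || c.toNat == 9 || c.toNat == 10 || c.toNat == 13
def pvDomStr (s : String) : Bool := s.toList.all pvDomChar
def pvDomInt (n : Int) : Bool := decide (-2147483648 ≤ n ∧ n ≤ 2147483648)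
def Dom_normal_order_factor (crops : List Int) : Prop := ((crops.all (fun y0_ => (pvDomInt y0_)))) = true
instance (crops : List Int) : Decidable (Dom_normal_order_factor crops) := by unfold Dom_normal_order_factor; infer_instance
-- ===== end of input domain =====

-- B recomputes, for each zero entry, the number of nonzero entries before it (nested double scan)
-- instead of A's single pass with a running nonzero counter; same value, alternative decomposition.

-- ===== PORT A =====
def normal_order_factor (crops : List Int) : Int :=
  let st := crops.foldl (fun (p : Int × Int) spin =>
      if spin == 0 then (p.1 + p.2, p.2) else (p.1, p.2 + 1)) (0, 0)
  -- (1,-1)[nperms % 2]: nperms ≥ 0, so the index is 0 or 1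
  if st.1 % 2 == 0 then 1 else -1

-- ===== PORT B =====
def normal_order_factor_alt (crops : List Int) : Int :=
  let total := (PySem.List.enumerate crops 0).foldl (fun (total : Int) (p : Int × Int) =>
      if p.2 == 0 then
        -- sum(1 for x in crops[:i] if x != 0)
        total + (PySem.List.slice crops none (some p.1)).foldl
          (fun (a : Int) x => if x != 0 then a + 1 else a) 0
      else total) 0
  if total % 2 == 0 then 1 else -1

-- ===== PRECONDITION & SPEC =====
def Spec_normal_order_factor (crops : List Int) (out : Int) : Prop := out = normal_order_factor_alt crops
instance (crops : List Int) (out : Int) : Decidable (Spec_normal_order_factor crops out) := by unfold Spec_normal_order_factor; infer_instance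

-- ===== CLAIM (what is proved, stated in full; the proofs are below) =====
def Claim_equal_normal_order_factor : Prop := ∀ (crops : List Int), Dom_normal_order_factor crops → Spec_normal_order_factor crops (normal_order_factor crops)

-- ===== LEMMAS AND PROOFS =====

-- ===== VERDICT (by name: the statement is the Claim_ definition above) =====
-- common recursive characterisation: inversion count with running nonzero counter s
def invSpec (s : Int) : List Int → Int
  | [] => 0
  | x :: xs => if x == 0 then s + invSpec s xs else invSpec (s + 1) xs

theorem foldA_eq (l : List Int) (p s : Int) :
    l.foldl (fun (q : Int × Int) spin =>
      if spin == 0 then (q.1 + q.2, q.2) else (q.1, q.2 + 1)) (p, s)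
    = (p + invSpec s l, s + (l.countP (fun x => x != 0) : Int)) := by
  induction l generalizing p s with
  | nil => simp [invSpec]
  | cons x xs ih =>
    rw [List.foldl_cons]
    by_cases hx : x = 0
    · rw [if_pos (by simp [hx]), ih]
      simp only [invSpec, if_pos (show (x == 0) = true by simp [hx]), List.countP_cons,
        Prod.mk.injEq]
      exact ⟨by ring, by simp [hx]⟩
    · rw [if_neg (by simp [hx]), ih]
      simp only [invSpec, if_neg (show ¬ (x == 0) = true by simp [hx]), List.countP_cons,
        Prod.mk.injEq]
      refine ⟨by trivial, ?_⟩
      simp [hx]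
      omega

theorem inner_eq (xs : List Int) (a : Int) :
    xs.foldl (fun (a : Int) x => if x != 0 then a + 1 else a) a
      = a + (xs.countP (fun x => x != 0) : Int) := by
  induction xs generalizing a with
  | nil => simp
  | cons x t ih =>
    rw [List.foldl_cons]
    by_cases hx : x = 0
    · rw [if_neg (by simp [hx]), ih, List.countP_cons]
      simp [hx]
    · rw [if_pos (by simp [hx]), ih, List.countP_cons]
      simp [hx]
      omega

theorem foldB_eq (crops : List Int) (l : List Int) (k : Nat) (t : Int)
    (hdrop : crops.drop k = l) :
    (PySem.List.enumerate l (k : Int)).foldl (fun (total : Int) (p : Int × Int) =>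
      if p.2 == 0 then
        total + (PySem.List.slice crops none (some p.1)).foldl
          (fun (a : Int) x => if x != 0 then a + 1 else a) 0
      else total) t
    = t + invSpec ((crops.take k).countP (fun x => x != 0) : Int) l := by
  induction l generalizing k t with
  | nil => simp [PySem.List.enumerate, invSpec]
  | cons x xs ih =>
    have hget : crops[k]? = some x := by
      rw [← List.head?_drop, hdrop]; rfl
    have hdrop' : crops.drop (k + 1) = xs := by
      rw [← List.drop_drop, hdrop]; rfl
    have htake : (crops.take (k + 1)).countP (fun x => x != 0)
        = (crops.take k).countP (fun x => x != 0) + if x = 0 then 0 else 1 := by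
      rw [List.take_add_one, hget]
      by_cases hx : x = 0 <;> simp [List.countP_append, hx]
    have hcast : (k : Int) + 1 = ((k + 1 : Nat) : Int) := by push_cast; ring
    rw [PySem.List.enumerate_cons, List.foldl_cons]
    by_cases hx : x = 0
    · rw [if_pos (by simp [hx]), PySem.List.slice_to_natCast, inner_eq, hcast,
        ih (k + 1) _ hdrop', htake, if_pos hx]
      simp only [invSpec, if_pos (show (x == 0) = true by simp [hx]), add_zero]
      ring
    · rw [if_neg (by simp [hx]), hcast, ih (k + 1) _ hdrop', htake, if_neg hx]
      simp only [invSpec, if_neg (show ¬ (x == 0) = true by simp [hx])]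
      push_cast
      ring_nf

theorem normal_order_factor_spec : Claim_equal_normal_order_factor := by
  intro crops _
  unfold Spec_normal_order_factor normal_order_factor normal_order_factor_alt
  have hA := foldA_eq crops 0 0
  have hB := foldB_eq crops crops 0 0 (by simp)
  simp only [Nat.cast_zero, List.take_zero, List.countP_nil, Nat.cast_zero] at hB
  rw [hA]
  simp only [hB, zero_add]
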